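-- pv_equiv track=rewrite | github.com/mihaMaks/2022SegmentationST | evaluation/word_by_word_eval.py | compare_len
-- ===== SOURCE A (Python) =====
-- def compare_len(real_segm, pred_segm):
--     real = set()
--     pred = set()
--     c = 0
--     for s in real_segm.split('|'):
--         real.add((c, s))
--         c += len(s)
--     r_len = c
--
--     c = 0
--     for s in pred_segm.split('|'):
--         pred.add((c, s))
--         c += len(s)
--     p_len = c
--
--     if r_len != p_len:
--         return False
--     return True
-- ===== SOURCE B (Python) =====
-- def compare_len(real_segm, pred_segm):
--     return len(real_segm) - real_segm.count('|') == len(pred_segm) - pred_segm.count('|')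
-- ===== Notes on version B (the rewrite author's own statement) =====
-- stated objective: simpler
-- what changed: Replaces the two split-and-fold loops (and the unused set building) with a closed-form computation: total segment length = character count minus '|' count, compared directly.
import Mathlib
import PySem

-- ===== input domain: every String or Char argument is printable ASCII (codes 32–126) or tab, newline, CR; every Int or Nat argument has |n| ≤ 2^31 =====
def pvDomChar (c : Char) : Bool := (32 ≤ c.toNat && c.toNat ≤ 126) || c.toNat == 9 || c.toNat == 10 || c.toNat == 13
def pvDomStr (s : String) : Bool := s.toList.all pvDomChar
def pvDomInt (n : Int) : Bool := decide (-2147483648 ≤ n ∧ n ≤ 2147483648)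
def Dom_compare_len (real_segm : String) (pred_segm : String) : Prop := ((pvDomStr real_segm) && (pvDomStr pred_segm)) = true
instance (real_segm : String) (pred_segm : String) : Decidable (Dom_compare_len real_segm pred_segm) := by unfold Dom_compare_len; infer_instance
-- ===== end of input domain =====

-- B replaces A's two split-and-accumulate loops (with their unused set building) by the
-- closed form "total segment length = character count minus '|' count" (objective: simpler).


-- ===== PORT A =====
-- One loop of A: over the split parts, add (c, s) to the set and advance c by len(s).
def compare_len_loop (parts : List (List Char)) : PySem.Set (Int × List Char) × Int :=
  parts.foldl (fun st s => (PySem.Set.add st.1 (st.2, s), st.2 + (s.length : Int)))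
    (PySem.Set.ofList [], 0)

def compare_len (real_segm : String) (pred_segm : String) : Bool :=
  let rSt := compare_len_loop (PySem.Chars.splitOn real_segm.toList ['|'])
  let r_len := rSt.2
  let pSt := compare_len_loop (PySem.Chars.splitOn pred_segm.toList ['|'])
  let p_len := pSt.2
  if r_len ≠ p_len then false else true

-- ===== PORT B =====
def compare_len_alt (real_segm : String) (pred_segm : String) : Bool :=
  decide (PySem.Str.len real_segm - (PySem.Str.count real_segm "|" : Int)
        = PySem.Str.len pred_segm - (PySem.Str.count pred_segm "|" : Int))

-- ===== PRECONDITION & SPEC =====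
def Spec_compare_len (real_segm : String) (pred_segm : String) (out : Bool) : Prop := out = compare_len_alt real_segm pred_segm
instance (real_segm : String) (pred_segm : String) (out : Bool) : Decidable (Spec_compare_len real_segm pred_segm out) := by unfold Spec_compare_len; infer_instance

-- ===== CLAIM (what is proved, stated in full; the proofs are below) =====
def Claim_equal_compare_len : Prop := ∀ (real_segm : String) (pred_segm : String), Dom_compare_len real_segm pred_segm → Spec_compare_len real_segm pred_segm (compare_len real_segm pred_segm)

-- ===== LEMMAS AND PROOFS =====

-- The accumulator of A's loop computes the sum of the part lengths.
theorem compare_len_loop_snd (parts : List (List Char)) :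
    (compare_len_loop parts).2 = ((parts.map List.length).sum : Int) := by
  unfold compare_len_loop
  suffices h : ∀ (parts : List (List Char)) (x : PySem.Set (Int × List Char)) (a : Int),
      (parts.foldl (fun st s => (PySem.Set.add st.1 (st.2, s), st.2 + (s.length : Int))) (x, a)).2
        = a + ((parts.map List.length).sum : Int) by
    simpa using h parts (PySem.Set.ofList []) 0
  intro parts
  induction parts with
  | nil => intro x a; simp
  | cons s t ih => intro x a; simp [List.foldl_cons, ih]; ring

-- splitOn.go invariant for the single-character separator '|':
-- (sum of result part lengths) + (number of '|' left in l) = (parts already in acc) + cur + l.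
theorem splitOn_go_sum (fuel : Nat) :
    ∀ (l cur : List Char) (acc : List (List Char)), l.length ≤ fuel →
      ((PySem.Chars.splitOn.go ['|'] fuel l cur acc).map List.length).sum + l.count '|'
        = (acc.map List.length).sum + cur.length + l.length := by
  induction fuel with
  | zero =>
    intro l cur acc hl
    have : l = [] := List.eq_nil_of_length_eq_zero (Nat.le_zero.mp hl)
    subst this
    simp [PySem.Chars.splitOn.go]
  | succ fuel ih =>
    intro l cur acc hl
    cases l with
    | nil => simp [PySem.Chars.splitOn.go]
    | cons c rest =>
      by_cases hc : c = '|'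
      · subst hc
        have hpre : List.isPrefixOf ['|'] ('|' :: rest) = true := by
          simp [List.isPrefixOf]
        rw [show PySem.Chars.splitOn.go ['|'] (fuel + 1) ('|' :: rest) cur acc
              = PySem.Chars.splitOn.go ['|'] fuel rest [] (cur.reverse :: acc) by
            simp [PySem.Chars.splitOn.go, hpre]]
        have := ih rest [] (cur.reverse :: acc) (by simpa using Nat.lt_succ_iff.mp (by simpa using hl))
        simp at this ⊢
        omega
      · have hpre : List.isPrefixOf ['|'] (c :: rest) = false := by
          simp [List.isPrefixOf]; exact fun h => hc h.symm
        rw [show PySem.Chars.splitOn.go ['|'] (fuel + 1) (c :: rest) cur acc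
              = PySem.Chars.splitOn.go ['|'] fuel rest (c :: cur) acc by
            simp [PySem.Chars.splitOn.go, hpre]]
        have := ih rest (c :: cur) acc (by simpa using Nat.lt_succ_iff.mp (by simpa using hl))
        simp [hc] at this ⊢
        omega

theorem splitOn_sum (cs : List Char) :
    ((PySem.Chars.splitOn cs ['|']).map List.length).sum + cs.count '|' = cs.length := by
  have := splitOn_go_sum (cs.length + 1) cs [] [] (Nat.le_succ _)
  simpa [PySem.Chars.splitOn] using this

-- count.go invariant for the single-character pattern '|'.
theorem count_go_eq (fuel : Nat) :
    ∀ (l : List Char) (acc : Nat), l.length ≤ fuel →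
      PySem.Chars.count.go ['|'] fuel l acc = acc + l.count '|' := by
  induction fuel with
  | zero =>
    intro l acc hl
    have : l = [] := List.eq_nil_of_length_eq_zero (Nat.le_zero.mp hl)
    subst this
    simp [PySem.Chars.count.go]
  | succ fuel ih =>
    intro l acc hl
    cases l with
    | nil => simp [PySem.Chars.count.go]
    | cons c rest =>
      by_cases hc : c = '|'
      · subst hc
        have hpre : List.isPrefixOf ['|'] ('|' :: rest) = true := by
          simp [List.isPrefixOf]
        rw [show PySem.Chars.count.go ['|'] (fuel + 1) ('|' :: rest) acc
              = PySem.Chars.count.go ['|'] fuel rest (acc + 1) by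
            simp [PySem.Chars.count.go, hpre]]
        have := ih rest (acc + 1) (by simpa using Nat.lt_succ_iff.mp (by simpa using hl))
        rw [this, List.count_cons]
        simp
        omega
      · have hpre : List.isPrefixOf ['|'] (c :: rest) = false := by
          simp [List.isPrefixOf]; exact fun h => hc h.symm
        rw [show PySem.Chars.count.go ['|'] (fuel + 1) (c :: rest) acc
              = PySem.Chars.count.go ['|'] fuel rest acc by
            simp [PySem.Chars.count.go, hpre]]
        have := ih rest acc (by simpa using Nat.lt_succ_iff.mp (by simpa using hl))
        rw [this, List.count_cons]
        simp [hc]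

theorem chars_count_bar (cs : List Char) :
    PySem.Chars.count cs ['|'] = cs.count '|' := by
  have h := count_go_eq cs.length cs 0 le_rfl
  simpa [PySem.Chars.count] using h

-- A's accumulator equals B's closed form, per string.
theorem seg_len_eq (s : String) :
    (compare_len_loop (PySem.Chars.splitOn s.toList ['|'])).2
      = PySem.Str.len s - (PySem.Str.count s "|" : Int) := by
  rw [compare_len_loop_snd]
  have h := splitOn_sum s.toList
  have hc : PySem.Str.count s "|" = s.toList.count '|' := by
    rw [PySem.Str.count_eq]; exact chars_count_bar s.toList
  have hlen : PySem.Str.len s = (s.toList.length : Int) := by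
    simp [PySem.Str.len_eq]
  rw [hc, hlen]
  omega

-- ===== VERDICT (by name: the statement is the Claim_ definition above) =====
theorem compare_len_spec : Claim_equal_compare_len := by
  intro r p _
  unfold Spec_compare_len compare_len compare_len_alt
  simp only [seg_len_eq]
  by_cases h : PySem.Str.len r - (PySem.Str.count r "|" : Int)
      = PySem.Str.len p - (PySem.Str.count p "|" : Int) <;> simp_all
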